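-- pv_equiv track=rewrite | github.com/wwzh-cn/Agent_CustomerService | rag/evaluation.py | count_relevant
-- ===== SOURCE A (Python) =====
-- def count_relevant(retrieved_chunks, relevant_keywords):
--     """
--     简化版相关性判断：检查检索片段是否包含关键词
--     实际应用中可使用更复杂的语义匹配
--
--     Args:
--         retrieved_chunks: 检索到的文档片段列表
--         relevant_keywords: 相关关键词列表
--
--     Returns:
--         int: 相关片段数量
--     """
--     count = 0
--     for chunk in retrieved_chunks:
--         chunk_lower = chunk.lower()  # 转为小写进行不区分大小写匹配
--         for keyword in relevant_keywords:
--             if keyword.lower() in chunk_lower: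
--                 count += 1
--                 break  # 只要匹配一个关键词就算相关
--     return count
-- ===== SOURCE B (Python) =====
-- def count_relevant(retrieved_chunks, relevant_keywords):
--     # Keyword-major pass: for each keyword, mark the (pre-lowered) chunks it
--     # occurs in; a chunk is relevant iff it ends up marked.  Correct because
--     # "chunk matches some keyword" is independent of which loop is outermost,
--     # and marking is monotone, so the not-yet-marked skip changes nothing.
--     lowered_chunks = [c.lower() for c in retrieved_chunks]
--     matched = [False] * len(lowered_chunks)
--     for keyword in relevant_keywords:
--         kw = keyword.lower()
--         for i, cl in enumerate(lowered_chunks):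
--             if not matched[i] and kw in cl:
--                 matched[i] = True
--     return sum(matched)
-- ===== Notes on version B (the rewrite author's own statement) =====
-- stated objective: alternative
-- what changed: B inverts the loop nesting: instead of A's chunk-major scan with an early break over keywords, B lowers every chunk once, then makes one pass per keyword over a boolean matched-marks array (skipping already-marked chunks) and finally sums the marks.
import Mathlib
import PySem

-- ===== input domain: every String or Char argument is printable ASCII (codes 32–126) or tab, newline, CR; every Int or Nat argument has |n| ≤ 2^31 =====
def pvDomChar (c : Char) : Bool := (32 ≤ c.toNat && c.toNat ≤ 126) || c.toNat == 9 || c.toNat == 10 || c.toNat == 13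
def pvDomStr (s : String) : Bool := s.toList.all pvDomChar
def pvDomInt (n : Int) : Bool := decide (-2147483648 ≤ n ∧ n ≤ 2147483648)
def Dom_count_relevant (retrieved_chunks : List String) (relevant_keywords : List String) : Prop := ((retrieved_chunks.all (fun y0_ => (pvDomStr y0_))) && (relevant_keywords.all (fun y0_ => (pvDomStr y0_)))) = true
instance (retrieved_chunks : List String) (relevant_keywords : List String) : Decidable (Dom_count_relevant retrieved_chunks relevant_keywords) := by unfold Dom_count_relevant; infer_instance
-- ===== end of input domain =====

-- B inverts the loops: one keyword-major marking pass over a boolean array of pre-lowered chunks, then sums the marks; objective: alternative.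


-- ===== PORT A =====
-- A's inner 'for keyword in …: if …: count += 1; break' loop
def pvAInner (chunk_lower : String) : List String → Int → Int
  | [], count => count
  | keyword :: rest, count =>
      if PySem.Str.isIn (PySem.Str.lower keyword) chunk_lower then count + 1
      else pvAInner chunk_lower rest count

def count_relevant (retrieved_chunks : List String) (relevant_keywords : List String) : Int :=
  retrieved_chunks.foldl
    (fun count chunk => pvAInner (PySem.Str.lower chunk) relevant_keywords count) 0

-- ===== PORT B =====
-- B's inner 'for i, cl in enumerate(lowered_chunks): if not matched[i] and kw in cl: matched[i] = True'
-- (walking matched and lowered_chunks in lockstep, i.e. a zipWith)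
def pvBMark (kw : String) (matched : List Bool) (lcs : List String) : List Bool :=
  List.zipWith (fun m cl => if !m && PySem.Str.isIn kw cl then true else m) matched lcs

def count_relevant_alt (retrieved_chunks : List String) (relevant_keywords : List String) : Int :=
  let lowered_chunks := retrieved_chunks.map PySem.Str.lower
  let matched := relevant_keywords.foldl
    (fun matched keyword => pvBMark (PySem.Str.lower keyword) matched lowered_chunks)
    (List.replicate lowered_chunks.length false)
  ((matched.countP id : Nat) : Int)

-- ===== PRECONDITION & SPEC =====
def Spec_count_relevant (retrieved_chunks : List String) (relevant_keywords : List String) (out : Int) : Prop := out = count_relevant_alt retrieved_chunks relevant_keywords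
instance (retrieved_chunks : List String) (relevant_keywords : List String) (out : Int) : Decidable (Spec_count_relevant retrieved_chunks relevant_keywords out) := by unfold Spec_count_relevant; infer_instance

-- ===== CLAIM (what is proved, stated in full; the proofs are below) =====
def Claim_equal_count_relevant : Prop := ∀ (retrieved_chunks : List String) (relevant_keywords : List String), Dom_count_relevant retrieved_chunks relevant_keywords → Spec_count_relevant retrieved_chunks relevant_keywords (count_relevant retrieved_chunks relevant_keywords)

-- ===== LEMMAS AND PROOFS =====
-- A's break loop adds 1 iff some keyword (lowered) occurs in the lowered chunk.
theorem pvAInner_eq (cl : String) (kws : List String) (count : Int) :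
    pvAInner cl kws count =
      count + (if kws.any (fun k => PySem.Str.isIn (PySem.Str.lower k) cl) then 1 else 0) := by
  induction kws with
  | nil => simp [pvAInner]
  | cons k rest ih =>
      by_cases h : PySem.Chars.isIn (PySem.Chars.lower k.toList) cl.toList = true
      · simp [pvAInner, h]
      · simp [pvAInner, h, ih]

theorem foldl_add_indicator (p : String → Bool) (xs : List String) (n : Int) :
    xs.foldl (fun c x => c + (if p x then 1 else 0)) n = n + (xs.countP p : Nat) := by
  induction xs generalizing n with
  | nil => simp
  | cons x xs ih =>
      simp only [List.foldl_cons, List.countP_cons, ih]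
      by_cases h : p x = true <;> simp [h] <;> try ring

-- one marking pass, applied to a marks list of the pointwise form (lcs.map f)
theorem pvBMark_map (kw : String) (lcs : List String) (f : String → Bool) :
    pvBMark kw (lcs.map f) lcs = lcs.map (fun cl => f cl || PySem.Str.isIn kw cl) := by
  induction lcs with
  | nil => rfl
  | cons c cs ih =>
      simp only [pvBMark, List.map_cons, List.zipWith_cons_cons]
      rw [show List.zipWith (fun m cl => if !m && PySem.Str.isIn kw cl then true else m)
            (cs.map f) cs = pvBMark kw (cs.map f) cs from rfl, ih]
      by_cases h : f c = true <;> simp [h]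

-- the whole keyword fold keeps the marks pointwise in the chunks
theorem pvBFold_map (kws : List String) (lcs : List String) (f : String → Bool) :
    kws.foldl (fun m k => pvBMark (PySem.Str.lower k) m lcs) (lcs.map f) =
      lcs.map (fun cl => f cl || kws.any (fun k => PySem.Str.isIn (PySem.Str.lower k) cl)) := by
  induction kws generalizing f with
  | nil => simp
  | cons k rest ih =>
      simp only [List.foldl_cons, pvBMark_map, ih, List.any_cons]
      congr 1; funext cl; by_cases h : f cl = true <;> simp [h, Bool.or_assoc]

-- ===== VERDICT (by name: the statement is the Claim_ definition above) =====
theorem count_relevant_spec : Claim_equal_count_relevant := by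
  intro chunks kws _
  show count_relevant chunks kws = count_relevant_alt chunks kws
  unfold count_relevant count_relevant_alt
  have hA : ∀ (n : Int),
      chunks.foldl (fun count chunk => pvAInner (PySem.Str.lower chunk) kws count) n =
      chunks.foldl (fun count chunk =>
        count + (if kws.any (fun k => PySem.Str.isIn (PySem.Str.lower k) (PySem.Str.lower chunk)) then 1 else 0)) n := by
    intro n
    induction chunks generalizing n with
    | nil => rfl
    | cons c cs ih => simp only [List.foldl_cons, pvAInner_eq]
  rw [hA, foldl_add_indicator]
  dsimp only
  have hrep : List.replicate (chunks.map PySem.Str.lower).length false =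
      (chunks.map PySem.Str.lower).map (fun _ => false) := by
    simp [List.map_const']
  rw [hrep, pvBFold_map]
  simp [List.countP_map, Function.comp_def]
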